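-- pv_equiv track=rewrite | github.com/cwverhey/adventofcode | 2024/day07.py | get_outcomes_v2
-- ===== SOURCE A (Python) =====
-- def get_outcomes_v2(n: list) -> list:
--     """
--     Get all possible outcomes for a list of numbers
--     """
--     outcomes = [
--         [ n[0]+n[1] , *n[2:] ],
--         [ n[0]*n[1] , *n[2:] ],
--         [ int(str(n[0]) + str(n[1])) , *n[2:] ]
--     ]
--     if len(n) == 2:
--         return [ o[0] for o in outcomes ]
--     else:
--         return [ o2 for o1 in outcomes for o2 in get_outcomes_v2(o1) ]
-- ===== SOURCE B (Python) =====
-- def get_outcomes_v2(n: list) -> list: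
--     """
--     Get all possible outcomes for a list of numbers (iterative fold)
--     """
--     acc = [n[0] + n[1], n[0] * n[1], int(str(n[0]) + str(n[1]))]
--     for x in n[2:]:
--         acc = [v for r in acc for v in (r + x, r * x, int(str(r) + str(x)))]
--     return acc
-- ===== Notes on version B (the rewrite author's own statement) =====
-- stated objective: alternative
-- what changed: Replaced A's branching recursion (three recursive calls per step, concatenated) with a single iterative left fold over n[2:] that rebuilds the outcome list in place, producing the same 3^(k-1) values in the same order.
-- outside the precondition, e.g. on get_outcomes_v2([3]): A raises IndexError, B raises IndexError; on get_outcomes_v2([1, -2]): A raises ValueError, B raises ValueError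
import Mathlib
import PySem

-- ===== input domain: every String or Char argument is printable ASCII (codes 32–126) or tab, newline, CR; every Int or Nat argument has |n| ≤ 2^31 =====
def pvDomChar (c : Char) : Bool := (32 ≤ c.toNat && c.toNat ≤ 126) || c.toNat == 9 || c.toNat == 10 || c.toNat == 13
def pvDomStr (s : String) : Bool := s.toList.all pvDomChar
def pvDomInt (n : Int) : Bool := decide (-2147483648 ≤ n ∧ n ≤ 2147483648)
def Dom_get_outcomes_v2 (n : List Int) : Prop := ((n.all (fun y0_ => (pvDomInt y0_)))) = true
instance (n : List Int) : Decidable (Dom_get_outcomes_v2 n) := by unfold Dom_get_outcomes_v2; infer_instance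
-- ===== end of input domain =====

-- B re-implements A's recursion as an iterative fold over the tail (same values, same order); no speed claim.

-- ===== PORT A =====
-- int(str(a) + str(b)); the .getD 0 is unreachable inside Pre_ (there int() never raises)
def pvConcatA (a b : Int) : Int :=
  (PySem.Int.ofStr? (PySem.Int.toStr a ++ PySem.Int.toStr b)).getD 0

def get_outcomes_v2 : List Int → List Int
  | a :: b :: rest =>
    -- outcomes = [[a+b,*rest],[a*b,*rest],[concat,*rest]]
    if rest = [] then
      [a + b, a * b, pvConcatA a b]      -- [o[0] for o in outcomes]
    else
      -- [o2 for o1 in outcomes for o2 in get_outcomes_v2(o1)]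
      get_outcomes_v2 ((a + b) :: rest) ++
      get_outcomes_v2 ((a * b) :: rest) ++
      get_outcomes_v2 ((pvConcatA a b) :: rest)
  | _ => []                              -- IndexError in Python; excluded by Pre_
  termination_by n => n.length
  decreasing_by all_goals simp

-- ===== PORT B =====
def pvConcatB (r x : Int) : Int :=
  (PySem.Int.ofStr? (PySem.Int.toStr r ++ PySem.Int.toStr x)).getD 0

def get_outcomes_v2_alt (n : List Int) : List Int :=
  match n with
  | [] => []                             -- IndexError in Python; excluded by Pre_
  | [_] => []                            -- IndexError in Python; excluded by Pre_
  | a :: b :: rest =>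
    rest.foldl (fun acc x => acc.flatMap (fun r => [r + x, r * x, pvConcatB r x]))
      [a + b, a * b, pvConcatB a b]

-- ===== PRECONDITION & SPEC =====
-- Pre_ excludes exactly the inputs where A raises: lists of length < 2 (IndexError on n[1])
-- and lists with a negative element after index 0 (int(str(r) + str(x)) gets a '-' mid-string: ValueError).
def Pre_get_outcomes_v2 (n : List Int) : Prop := 2 ≤ n.length ∧ ∀ x ∈ n.tail, 0 ≤ x
instance (n : List Int) : Decidable (Pre_get_outcomes_v2 n) := by unfold Pre_get_outcomes_v2; infer_instance
def pvWitness_get_outcomes_v2 : List Int := [1, 2, 3]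

def Spec_get_outcomes_v2 (n : List Int) (out : List Int) : Prop := out = get_outcomes_v2_alt n
instance (n : List Int) (out : List Int) : Decidable (Spec_get_outcomes_v2 n out) := by unfold Spec_get_outcomes_v2; infer_instance

-- ===== CLAIM (what is proved, stated in full; the proofs are below) =====
def Claim_equal_get_outcomes_v2 : Prop := ∀ (n : List Int), Dom_get_outcomes_v2 n → Pre_get_outcomes_v2 n → Spec_get_outcomes_v2 n (get_outcomes_v2 n)

-- ===== LEMMAS AND PROOFS =====
theorem pvConcat_eq (a b : Int) : pvConcatA a b = pvConcatB a b := rfl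

-- the fold step distributes over ++ of accumulators
theorem foldl_step_append (rest : List Int) (l₁ l₂ : List Int) :
    rest.foldl (fun acc x => acc.flatMap (fun r => [r + x, r * x, pvConcatB r x])) (l₁ ++ l₂)
      = rest.foldl (fun acc x => acc.flatMap (fun r => [r + x, r * x, pvConcatB r x])) l₁
        ++ rest.foldl (fun acc x => acc.flatMap (fun r => [r + x, r * x, pvConcatB r x])) l₂ := by
  induction rest generalizing l₁ l₂ with
  | nil => simp
  | cons x rest ih =>
    simp only [List.foldl_cons, List.flatMap_append]
    exact ih _ _

theorem get_outcomes_v2_eq_fold (rest : List Int) : ∀ (a b : Int),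
    get_outcomes_v2 (a :: b :: rest)
      = rest.foldl (fun acc x => acc.flatMap (fun r => [r + x, r * x, pvConcatB r x]))
          [a + b, a * b, pvConcatB a b] := by
  induction rest with
  | nil => intro a b; simp [get_outcomes_v2, pvConcat_eq]
  | cons x rest ih =>
    intro a b
    rw [get_outcomes_v2]
    simp only [reduceCtorEq, if_false, ih, pvConcat_eq, List.foldl_cons]
    rw [← foldl_step_append, ← foldl_step_append]
    simp [List.flatMap_cons]

-- ===== VERDICT (by name: the statement is the Claim_ definition above) =====
theorem get_outcomes_v2_spec : Claim_equal_get_outcomes_v2 := by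
  intro n _ hpre
  unfold Spec_get_outcomes_v2
  match n with
  | [] => exact absurd hpre.1 (by simp)
  | [a] => exact absurd hpre.1 (by simp)
  | a :: b :: rest => simp [get_outcomes_v2_alt, get_outcomes_v2_eq_fold]
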